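-- pv_equiv track=rewrite | github.com/AvalonLucero/UTPB-COSC-6350-Project4 | four_way_handshake.py | simplify_aes_encrypt
-- ===== SOURCE A (Python) =====
-- def xor_bytes(byte_data, key):
--     """Perform XOR between byte data and key (simplified)."""
--     return [b ^ key for b in byte_data]
--
-- def simplify_aes_encrypt(session_key, plaintext):
--     """Encrypt the plaintext using a simplified AES-like approach."""
--     rounds = 5
--     byte_data = [ord(c) for c in plaintext]
--
--     # First round, XOR the plaintext with the session key
--     byte_data = xor_bytes(byte_data, session_key)
--
--     # Simplified rounds (just XORing and rotating)
--     for _ in range(rounds):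
--         byte_data = xor_bytes(byte_data, session_key)
--         byte_data = byte_data[1:] + byte_data[:1]  # Rotate left by 1
--
--     return byte_data
-- ===== SOURCE B (Python) =====
-- def simplify_aes_encrypt(session_key, plaintext):
--     """The six XORs with the same key cancel pairwise, so the result is just
--     the ord-codes rotated left by 5 (mod length)."""
--     b = [ord(c) for c in plaintext]
--     if not b:
--         return b
--     k = 5 % len(b)
--     return b[k:] + b[:k]
-- ===== Notes on version B (the rewrite author's own statement) =====
-- stated objective: faster
-- what changed: B drops all six XOR passes (they cancel pairwise) and the five rotate-by-1 passes, returning the ord list rotated left by 5 mod its length in a single slice.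
import Mathlib
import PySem

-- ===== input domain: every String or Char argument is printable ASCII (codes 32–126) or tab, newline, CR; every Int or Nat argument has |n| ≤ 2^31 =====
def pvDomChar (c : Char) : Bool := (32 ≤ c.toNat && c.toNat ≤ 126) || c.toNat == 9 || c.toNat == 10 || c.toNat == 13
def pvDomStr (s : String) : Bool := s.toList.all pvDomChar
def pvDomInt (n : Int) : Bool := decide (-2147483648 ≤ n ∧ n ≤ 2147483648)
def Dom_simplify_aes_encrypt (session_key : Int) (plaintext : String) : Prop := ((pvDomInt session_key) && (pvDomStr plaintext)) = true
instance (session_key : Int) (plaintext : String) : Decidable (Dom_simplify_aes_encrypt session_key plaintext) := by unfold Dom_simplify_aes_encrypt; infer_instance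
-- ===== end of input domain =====

-- B replaces A's six XOR passes (which cancel pairwise) and five rotate-by-1 passes
-- with a single slice rotating the ord list left by 5 mod its length (constant-factor faster).


-- ===== PORT A =====
def xor_bytes (byte_data : List Int) (key : Int) : List Int :=
  byte_data.map (fun b => PySem.Int.bxor b key)

def simplify_aes_encrypt (session_key : Int) (plaintext : String) : List Int :=
  let byte_data := plaintext.toList.map (fun c => (c.toNat : Int))
  let byte_data := xor_bytes byte_data session_key
  (List.range 5).foldl (fun bd _ =>
    let bd := xor_bytes bd session_key
    bd.drop 1 ++ bd.take 1) byte_data   -- byte_data[1:] + byte_data[:1]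

-- ===== PORT B =====
def simplify_aes_encrypt_alt (session_key : Int) (plaintext : String) : List Int :=
  let b : List Int := plaintext.toList.map (fun c => (c.toNat : Int))
  if b.length = 0 then b
  else
    let k := 5 % b.length
    b.drop k ++ b.take k   -- b[k:] + b[:k], 0 ≤ k < len b

-- ===== PRECONDITION & SPEC =====
def Spec_simplify_aes_encrypt (session_key : Int) (plaintext : String) (out : List Int) : Prop := out = simplify_aes_encrypt_alt session_key plaintext
instance (session_key : Int) (plaintext : String) (out : List Int) : Decidable (Spec_simplify_aes_encrypt session_key plaintext out) := by unfold Spec_simplify_aes_encrypt; infer_instance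

-- ===== CLAIM (what is proved, stated in full; the proofs are below) =====
def Claim_equal_simplify_aes_encrypt : Prop := ∀ (session_key : Int) (plaintext : String), Dom_simplify_aes_encrypt session_key plaintext → Spec_simplify_aes_encrypt session_key plaintext (simplify_aes_encrypt session_key plaintext)

-- ===== LEMMAS AND PROOFS =====

theorem bxor_cancel (a b : Int) : PySem.Int.bxor (PySem.Int.bxor a b) b = a := by
  unfold PySem.Int.bxor
  rcases le_or_gt 0 a with ha | ha <;> rcases le_or_gt 0 b with hb | hb
  · simp [ha, hb]
  · have h1 : ¬ (0 : Int) ≤ b := by omega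
    have h2 : ¬ (0:Int) ≤ -↑(a.toNat ^^^ (-b - 1).toNat) - 1 := by
      have : (0:Int) ≤ ↑(a.toNat ^^^ (-b - 1).toNat) := Int.natCast_nonneg _
      omega
    simp only [if_pos ha, if_neg h1, if_neg h2]
    have h3 : (-(-↑(a.toNat ^^^ (-b - 1).toNat) - 1) - 1 : Int) = ↑(a.toNat ^^^ (-b - 1).toNat) := by ring
    rw [h3, Int.toNat_natCast, Nat.xor_xor_cancel_right, Int.toNat_of_nonneg ha]
  · have h2 : ¬ (0:Int) ≤ a := by omega
    have h4 : ¬ (0:Int) ≤ -↑((-a - 1).toNat ^^^ b.toNat) - 1 := by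
      have : (0:Int) ≤ ↑((-a - 1).toNat ^^^ b.toNat) := Int.natCast_nonneg _
      omega
    simp only [if_neg h2, if_pos hb, if_neg h4]
    have h3 : (-(-↑((-a - 1).toNat ^^^ b.toNat) - 1) - 1 : Int) = ↑((-a - 1).toNat ^^^ b.toNat) := by ring
    rw [h3, Int.toNat_natCast, Nat.xor_xor_cancel_right]
    omega
  · have h2 : ¬ (0:Int) ≤ a := by omega
    have h1 : ¬ (0:Int) ≤ b := by omega
    have h5 : (0:Int) ≤ ↑((-a - 1).toNat ^^^ (-b - 1).toNat) := Int.natCast_nonneg _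
    simp only [if_neg h2, if_neg h1, if_pos h5]
    rw [Int.toNat_natCast, Nat.xor_xor_cancel_right]
    omega

theorem xor_bytes_xor_bytes (l : List Int) (k : Int) : xor_bytes (xor_bytes l k) k = l := by
  unfold xor_bytes
  rw [List.map_map]
  conv_rhs => rw [← List.map_id l]
  exact List.map_congr_left (fun a _ => bxor_cancel a k)

theorem rot_eq_rotate (l : List Int) : l.drop 1 ++ l.take 1 = l.rotate 1 := by
  cases l with
  | nil => simp
  | cons a t =>
    rw [List.rotate_eq_drop_append_take (by simp)]

theorem xor_bytes_rotate (l : List Int) (k : Int) (n : Nat) :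
    xor_bytes (l.rotate n) k = (xor_bytes l k).rotate n := by
  simp [xor_bytes, List.map_rotate]

theorem a_eq_rotate5 (session_key : Int) (plaintext : String) :
    simplify_aes_encrypt session_key plaintext =
      (plaintext.toList.map (fun c => (c.toNat : Int))).rotate 5 := by
  unfold simplify_aes_encrypt
  have h5 : List.range 5 = [0, 1, 2, 3, 4] := rfl
  rw [h5]
  simp only [List.foldl_cons, List.foldl_nil]
  simp only [rot_eq_rotate, xor_bytes_rotate, xor_bytes_xor_bytes, List.rotate_rotate]

-- ===== VERDICT (by name: the statement is the Claim_ definition above) =====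
theorem simplify_aes_encrypt_spec : Claim_equal_simplify_aes_encrypt := by
  intro session_key plaintext _
  unfold Spec_simplify_aes_encrypt
  rw [a_eq_rotate5]
  unfold simplify_aes_encrypt_alt
  set l := plaintext.toList.map (fun c => (c.toNat : Int)) with hl
  by_cases h : l.length = 0
  · simp [List.length_eq_zero_iff.mp h]
  · simp only [if_neg h]
    rw [← List.rotate_mod, List.rotate_eq_drop_append_take (Nat.le_of_lt (Nat.mod_lt _ (Nat.pos_of_ne_zero h)))]
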